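-- pv_equiv track=rewrite | github.com/pm1100tm/Algorithm | code_snippet/consecutive_numbers_with_n.py | is_consecutive_numbers_2
-- ===== SOURCE A (Python) =====
-- def is_consecutive_numbers_2(numbers: list[int], n: int) -> bool:
--     """
--     연속되는 n 개의 정수 배열의 처음 값과 끝의 값을 뺀 값이 n - 1 라는 규칙을 이용한다.
--     Sliding Window
--     """
--     sorted_number = sorted(set(numbers))
--
--     if len(sorted_number) < n:
--         return False
--
--     for i in range(len(sorted_number) - n + 1):
--         if sorted_number[i + n - 1] - sorted_number[i] == n - 1:
--             return True
--
--     return False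
-- ===== SOURCE B (Python) =====
-- def is_consecutive_numbers_2(numbers: list[int], n: int) -> bool:
--     # No sorting: probe the hash set directly for a run of n consecutive values.
--     s = set(numbers)
--
--     def has_run_from(x):
--         k = 0
--         while k < n:
--             if x + k not in s:
--                 return False
--             k += 1
--         return True
--
--     return any(has_run_from(x) for x in s)
-- ===== Notes on version B (the rewrite author's own statement) =====
-- stated objective: alternative
-- what changed: Replaces sort-deduplicate plus an indexed sliding-window scan by direct hash-set probing: for each distinct value, test whether the n consecutive values starting there are all present (each probe stops at the first gap).
-- outside the precondition, e.g. on is_consecutive_numbers_2([0, 1, 2], -1): A returns True, B returns True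
import Mathlib
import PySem

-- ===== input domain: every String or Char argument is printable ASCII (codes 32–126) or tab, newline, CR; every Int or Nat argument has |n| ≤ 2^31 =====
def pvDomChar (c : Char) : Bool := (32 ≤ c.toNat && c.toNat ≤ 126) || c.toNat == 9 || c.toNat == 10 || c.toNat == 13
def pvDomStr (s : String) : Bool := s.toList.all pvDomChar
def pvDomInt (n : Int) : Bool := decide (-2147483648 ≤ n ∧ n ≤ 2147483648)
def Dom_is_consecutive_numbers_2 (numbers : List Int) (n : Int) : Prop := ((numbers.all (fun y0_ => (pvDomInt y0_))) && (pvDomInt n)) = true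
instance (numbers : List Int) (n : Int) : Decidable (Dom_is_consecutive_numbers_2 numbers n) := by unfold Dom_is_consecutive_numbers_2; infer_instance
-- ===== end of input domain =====

-- B drops the sort: it probes the deduplicated value set directly for a run of n
-- consecutive values (return value only; neither program mutates its arguments).

-- ===== PORT A =====
def is_consecutive_numbers_2 (numbers : List Int) (n : Int) : Bool :=
  let sorted_number := PySem.List.sorted (PySem.Set.ofList numbers) (fun x => x) false
  if (sorted_number.length : Int) < n then false
  else
    (PySem.List.pyRange 0 ((sorted_number.length : Int) - n + 1) 1).any (fun i =>
      match PySem.List.pyGet? sorted_number (i + n - 1), PySem.List.pyGet? sorted_number i with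
      | some a, some b => a - b == n - 1
      | _, _ => false)  -- IndexError branch; unreachable when Pre_ (1 ≤ n) holds

-- ===== PORT B =====
-- while k < n: if x + k not in s: return False; k += 1; return True
def pvHasRunFrom (s : List Int) (n x k : Int) : Bool :=
  if _h : k < n then
    if (x + k) ∈ s then pvHasRunFrom s n x (k + 1) else false
  else true
termination_by (n - k).toNat
decreasing_by omega

def is_consecutive_numbers_2_alt (numbers : List Int) (n : Int) : Bool :=
  let s := PySem.Set.ofList numbers
  s.any (fun x => pvHasRunFrom s n x 0)

-- ===== PRECONDITION & SPEC =====
-- Pre_ excludes n ≤ 0, outside the function's natural domain: there A raises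
-- IndexError on most inputs and, where it does return, the value comes from
-- accidental negative-index wraparound of the window bounds.
def Pre_is_consecutive_numbers_2 (numbers : List Int) (n : Int) : Prop := 1 ≤ n
instance (numbers : List Int) (n : Int) : Decidable (Pre_is_consecutive_numbers_2 numbers n) := by unfold Pre_is_consecutive_numbers_2; infer_instance

def pvWitness_is_consecutive_numbers_2 : List Int × Int := ([3, 1, 2, 7], 3)

def Spec_is_consecutive_numbers_2 (numbers : List Int) (n : Int) (out : Bool) : Prop := out = is_consecutive_numbers_2_alt numbers n
instance (numbers : List Int) (n : Int) (out : Bool) : Decidable (Spec_is_consecutive_numbers_2 numbers n out) := by unfold Spec_is_consecutive_numbers_2; infer_instance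

-- ===== CLAIM (what is proved, stated in full; the proofs are below) =====
def Claim_equal_is_consecutive_numbers_2 : Prop := ∀ (numbers : List Int) (n : Int), Dom_is_consecutive_numbers_2 numbers n → Pre_is_consecutive_numbers_2 numbers n → Spec_is_consecutive_numbers_2 numbers n (is_consecutive_numbers_2 numbers n)

-- ===== LEMMAS AND PROOFS =====

-- In a strictly increasing Int list, indices d apart differ by at least d.
theorem pvRunMono (L : List Int) (hL : L.Pairwise (· < ·)) (d i : Nat)
    (h : i + d < L.length) : L[i]'(by omega) + d ≤ L[i + d]'h := by
  induction d with
  | zero => simp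
  | succ d ih =>
    have h1 : i + d < L.length := by omega
    have hle := ih h1
    have hlt : L[i + d]'h1 < L[i + d + 1]'(by omega) :=
      List.pairwise_iff_getElem.mp hL (i + d) (i + d + 1) h1 (by omega) (by omega)
    have key : L[i + (d + 1)]'h = L[i + d + 1]'(by omega) := rfl
    push_cast
    push_cast at hle
    omega

theorem pvIdxLe (L : List Int) (hL : L.Pairwise (· < ·)) (i j : Nat)
    (hij : i ≤ j) (hj : j < L.length) : L[i]'(by omega) ≤ L[j]'hj := by
  obtain ⟨d, rfl⟩ : ∃ d, j = i + d := ⟨j - i, by omega⟩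
  have := pvRunMono L hL d i hj
  omega

-- Backward walk: if x sits at index i and x, x+1, …, x+n'-1 are all in L,
-- then they occupy the consecutive indices i, i+1, ….
theorem pvRunIndices (L : List Int) (hL : L.Pairwise (· < ·)) (x : Int)
    (i : Nat) (hi : i < L.length) (hx : L[i] = x) (n' : Nat)
    (hall : ∀ k : Nat, k < n' → x + (k : Int) ∈ L) :
    ∀ k : Nat, k < n' → ∃ h : i + k < L.length, L[i + k]'h = x + (k : Int) := by
  intro k
  induction k with
  | zero => intro _; exact ⟨by omega, by simpa using hx⟩
  | succ k ih =>
    intro hk1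
    obtain ⟨hlen, hEk⟩ := ih (by omega)
    have hmem : x + ((k + 1 : Nat) : Int) ∈ L := hall (k + 1) hk1
    obtain ⟨j, hj, hLj⟩ := List.mem_iff_getElem.mp hmem
    have hjgt : i + k < j := by
      by_contra hle
      have := pvIdxLe L hL j (i + k) (by omega) hlen
      push_cast at hLj
      omega
    have hlen1 : i + k + 1 < L.length := by omega
    refine ⟨hlen1, ?_⟩
    have h1 : L[i + k + 1]'hlen1 ≤ L[j]'hj := pvIdxLe L hL (i + k + 1) j (by omega) hj
    have h2 : L[i + k]'hlen < L[i + k + 1]'hlen1 :=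
      List.pairwise_iff_getElem.mp hL (i + k) (i + k + 1) hlen hlen1 (by omega)
    have key : L[i + (k + 1)]'hlen1 = L[i + k + 1]'hlen1 := rfl
    push_cast at hLj ⊢
    omega

-- The sliding-window condition on the sorted distinct list is equivalent to the
-- existence of a length-n' run of consecutive values.
theorem pvWindowIffRun (L : List Int) (hL : L.Pairwise (· < ·)) (n' : Nat) (hn : 1 ≤ n') :
    (∃ i : Nat, i + n' ≤ L.length ∧ L.getD (i + n' - 1) 0 - L.getD i 0 = (n' : Int) - 1)
    ↔ (∃ x ∈ L, ∀ k : Nat, k < n' → x + (k : Int) ∈ L) := by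
  constructor
  · rintro ⟨i, hlen, heq⟩
    have hi : i < L.length := by omega
    have hin1 : i + (n' - 1) < L.length := by omega
    rw [List.getD_eq_getElem L 0 (by omega : i + n' - 1 < L.length),
        List.getD_eq_getElem L 0 hi] at heq
    refine ⟨L[i], List.getElem_mem hi, ?_⟩
    intro k hk
    have hik : i + k < L.length := by omega
    have hlo := pvRunMono L hL k i hik
    have hd2 : (i + k) + (n' - 1 - k) < L.length := by omega
    have hhi := pvRunMono L hL (n' - 1 - k) (i + k) hd2
    have key : L[(i + k) + (n' - 1 - k)]'hd2 = L[i + n' - 1]'(by omega) := by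
      congr 1
      omega
    have : L[i + k] = L[i] + (k : Int) := by push_cast at hlo hhi ⊢; omega
    rw [← this]
    exact List.getElem_mem hik
  · rintro ⟨x, hxL, hall⟩
    obtain ⟨i, hi, hxi⟩ := List.mem_iff_getElem.mp hxL
    have hidx := pvRunIndices L hL x i hi hxi n' hall
    obtain ⟨hL1, hE1⟩ := hidx (n' - 1) (by omega)
    refine ⟨i, by omega, ?_⟩
    rw [List.getD_eq_getElem L 0 (by omega : i + n' - 1 < L.length),
        List.getD_eq_getElem L 0 (by omega : i < L.length)]
    have hidx2 : i + n' - 1 = i + (n' - 1) := by omega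
    have : L[i + n' - 1]'(by omega) = L[i + (n' - 1)]'hL1 := by
      congr 1
    rw [this, hE1, hxi]
    omega

-- Characterisation of the A port under 1 ≤ n.
theorem pvAChar (numbers : List Int) (n : Int) (hn : 1 ≤ n) :
    is_consecutive_numbers_2 numbers n = true ↔
      (∃ i : Nat, i + n.toNat ≤ (PySem.List.sorted (PySem.Set.ofList numbers) (fun x => x) false).length ∧
        (PySem.List.sorted (PySem.Set.ofList numbers) (fun x => x) false).getD (i + n.toNat - 1) 0
          - (PySem.List.sorted (PySem.Set.ofList numbers) (fun x => x) false).getD i 0 = (n.toNat : Int) - 1) := by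
  set L := PySem.List.sorted (PySem.Set.ofList numbers) (fun x => x) false with hLdef
  unfold is_consecutive_numbers_2
  rw [← hLdef]
  by_cases hlt : (L.length : Int) < n
  · rw [if_pos hlt]
    refine iff_of_false (by simp) ?_
    rintro ⟨i, hlen, -⟩
    omega
  · rw [if_neg hlt, List.any_eq_true]
    constructor
    · rintro ⟨i, hmem, hcond⟩
      rw [PySem.List.mem_pyRange_one] at hmem
      obtain ⟨h0, hub⟩ := hmem
      have hr1 : 0 ≤ i + n - 1 := by omega
      have hr2 : i + n - 1 < (L.length : Int) := by omega
      have hr3 : i < (L.length : Int) := by omega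
      rw [PySem.List.pyGet?_eq_some_getElem L hr1 hr2,
          PySem.List.pyGet?_eq_some_getElem L h0 hr3] at hcond
      simp only [beq_iff_eq] at hcond
      refine ⟨i.toNat, by omega, ?_⟩
      rw [List.getD_eq_getElem L 0 (by omega : i.toNat + n.toNat - 1 < L.length),
          List.getD_eq_getElem L 0 (by omega : i.toNat < L.length)]
      have h1 : (i + n - 1).toNat = i.toNat + n.toNat - 1 := by omega
      simp only [h1] at hcond
      have h2 : ((n.toNat : Int)) = n := by omega
      rw [h2]
      exact hcond
    · rintro ⟨i, hlen, heq⟩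
      refine ⟨(i : Int), ?_, ?_⟩
      · rw [PySem.List.mem_pyRange_one]
        omega
      · have hr1 : 0 ≤ (i : Int) + n - 1 := by omega
        have hr2 : (i : Int) + n - 1 < (L.length : Int) := by omega
        have hr3 : (i : Int) < (L.length : Int) := by omega
        rw [PySem.List.pyGet?_eq_some_getElem L hr1 hr2,
            PySem.List.pyGet?_eq_some_getElem L (by omega) hr3]
        rw [List.getD_eq_getElem L 0 (by omega : i + n.toNat - 1 < L.length),
            List.getD_eq_getElem L 0 (by omega : i < L.length)] at heq
        have h1 : ((i : Int) + n - 1).toNat = i + n.toNat - 1 := by omega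
        have h2 : ((i : Int)).toNat = i := by omega
        have hval : L[((i : Int) + n - 1).toNat]'(by omega) - L[((i : Int)).toNat]'(by omega) = n - 1 := by
          simp only [h1, h2]
          omega
        exact (beq_iff_eq).mpr hval

-- pvHasRunFrom tests membership of x+k, …, x+n-1.
theorem pvHasRunIff (s : List Int) (n x : Int) (m : Nat) :
    ∀ k : Int, (n - k).toNat = m →
      (pvHasRunFrom s n x k = true ↔ ∀ j : Int, k ≤ j → j < n → x + j ∈ s) := by
  induction m with
  | zero =>
    intro k hm
    rw [pvHasRunFrom, dif_neg (by omega : ¬ k < n)]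
    simp only [true_iff]
    intro j hj1 hj2
    omega
  | succ m ih =>
    intro k hm
    rw [pvHasRunFrom, dif_pos (by omega : k < n)]
    by_cases hmem : (x + k) ∈ s
    · rw [if_pos hmem, ih (k + 1) (by omega)]
      constructor
      · intro h j hj1 hj2
        rcases eq_or_lt_of_le hj1 with h' | h'
        · rwa [← h']
        · exact h j (by omega) hj2
      · intro h j hj1 hj2
        exact h j (by omega) hj2
    · rw [if_neg hmem]
      refine iff_of_false (by simp) ?_
      intro hforall
      exact hmem (hforall k (le_refl k) (by omega))

-- Characterisation of the B port.
theorem pvBChar (numbers : List Int) (n : Int) :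
    is_consecutive_numbers_2_alt numbers n = true ↔
      ∃ x ∈ PySem.Set.ofList numbers,
        ∀ k : Nat, k < n.toNat → x + (k : Int) ∈ PySem.Set.ofList numbers := by
  unfold is_consecutive_numbers_2_alt
  rw [List.any_eq_true]
  constructor
  · rintro ⟨x, hx, hrun⟩
    rw [pvHasRunIff _ n x (n - 0).toNat 0 rfl] at hrun
    refine ⟨x, hx, ?_⟩
    intro k hk
    exact hrun k (by omega) (by omega)
  · rintro ⟨x, hx, hall⟩
    refine ⟨x, hx, ?_⟩
    rw [pvHasRunIff _ n x (n - 0).toNat 0 rfl]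
    intro j hj1 hj2
    have := hall j.toNat (by omega)
    have hc : ((j.toNat : Int)) = j := by omega
    rwa [hc] at this
-- ===== VERDICT (by name: the statement is the Claim_ definition above) =====
theorem is_consecutive_numbers_2_spec : Claim_equal_is_consecutive_numbers_2 := by
  intro numbers n _hdom hpre
  unfold Spec_is_consecutive_numbers_2
  have hn : 1 ≤ n := hpre
  rw [Bool.eq_iff_iff, pvAChar numbers n hn, pvBChar numbers n]
  have hL := PySem.List.sorted_ofList_pairwise_lt (xs := numbers)
  rw [pvWindowIffRun _ hL n.toNat (by omega)]
  constructor
  · rintro ⟨x, hx, hall⟩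
    rw [PySem.List.mem_sorted] at hx
    refine ⟨x, hx, fun k hk => ?_⟩
    have := hall k hk
    rwa [PySem.List.mem_sorted] at this
  · rintro ⟨x, hx, hall⟩
    rw [← PySem.List.mem_sorted (key := fun x => x) (rev := false)] at hx
    refine ⟨x, hx, fun k hk => ?_⟩
    have := hall k hk
    rwa [← PySem.List.mem_sorted (key := fun x => x) (rev := false)] at this
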